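-- pv_equiv track=rewrite | github.com/SteadBytes/advent-of-code-2018 | 08/solution.py | part_2
-- ===== SOURCE A (Python) =====
-- def part_2(entries):
--     def sum_metadata(entries):
--         n_child, n_meta = entries[:2]
--         remaining_entries = entries[2:]
--
--         meta_total = 0
--         child_node_values = []
--
--         for _ in range(n_child):
--             child_total, child_value, remaining_entries = sum_metadata(
--                 remaining_entries
--             )
--             meta_total += child_total
--             child_node_values.append(child_value)
--
--         current_node_meta = remaining_entries[:n_meta]
--         current_node_meta_total = sum(current_node_meta)
--
--         meta_total += current_node_meta_total
--
--         if n_child == 0: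
--             current_node_value = current_node_meta_total
--         else:
--             current_node_value = sum(
--                 child_node_values[i - 1]  # account for 0 based index
--                 for i in current_node_meta
--                 if i > 0 and i <= len(child_node_values)
--             )
--
--         return meta_total, current_node_value, remaining_entries[n_meta:]
--
--     return sum_metadata(entries)[1]
-- ===== SOURCE B (Python) =====
-- def part_2(entries):
--     # Iterative single-pass parse with an explicit stack of frames instead of recursion.
--     rest = entries
--     stack = []  # frames: [n_child, pending_children, n_meta, child_values]
--     while True:
--         if stack and stack[-1][1] == 0:
--             n_child, _, n_meta, vals = stack.pop()
--             meta = rest[:n_meta]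
--             rest = rest[n_meta:]
--             if n_child == 0:
--                 value = sum(meta)
--             else:
--                 value = sum(vals[m - 1] for m in meta if 0 < m <= len(vals))
--             if not stack:
--                 return value
--             stack[-1][3].append(value)
--         else:
--             if stack:
--                 stack[-1][1] -= 1
--             n_child, n_meta = rest[:2]
--             rest = rest[2:]
--             stack.append([n_child, max(n_child, 0), n_meta, []])
-- ===== Notes on version B (the rewrite author's own statement) =====
-- stated objective: alternative
-- what changed: Replaces A's recursive descent (sum_metadata calling itself per child) by an iterative single-pass parse driven by an explicit stack of frames (n_child, pending children, n_meta, completed child values), so B uses no recursion at all.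
import Mathlib
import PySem

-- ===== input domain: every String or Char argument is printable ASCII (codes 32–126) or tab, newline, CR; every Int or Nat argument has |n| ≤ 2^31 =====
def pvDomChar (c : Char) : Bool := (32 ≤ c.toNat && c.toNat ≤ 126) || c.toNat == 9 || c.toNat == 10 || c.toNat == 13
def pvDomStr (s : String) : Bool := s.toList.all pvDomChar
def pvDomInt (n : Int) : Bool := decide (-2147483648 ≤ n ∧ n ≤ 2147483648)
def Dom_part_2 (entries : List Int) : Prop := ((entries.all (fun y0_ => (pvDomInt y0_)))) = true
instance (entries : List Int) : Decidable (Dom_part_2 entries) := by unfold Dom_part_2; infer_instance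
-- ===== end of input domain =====

-- B replaces A's recursive tree walk by an iterative single-pass parse over an explicit
-- stack of frames (objective: alternative decomposition, no recursion; same value everywhere A returns).

-- ===== PORT A =====
-- Port of A's recursive sum_metadata.  Python recursion is not structural, so the port
-- carries a fuel argument; fuel entries.length + 1 is always sufficient because every
-- recursive call works on a list at least 2 shorter (its caller consumed a 2-entry header).
mutual
def sumMetaA : Nat → List Int → Option (Int × Int × List Int)
  | 0, _ => none
  | f+1, entries =>
    match entries with
    | nc :: nm :: rest =>
      match childLoopA f nc.toNat 0 [] rest with
      | none => none
      | some (mt, vals, rem) =>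
        let metaL := PySem.List.slice rem none (some nm)
        let metaTot := metaL.sum
        let value : Int :=
          if nc = 0 then metaTot
          else metaL.foldl
            (fun acc m => if 0 < m ∧ m ≤ (vals.length : Int) then acc + PySem.List.pyGetD vals (m - 1) 0 else acc) 0
        some (mt + metaTot, value, PySem.List.slice rem (some nm) none)
    | _ => none
  termination_by f _ => (f, 0, 0)

-- the 'for _ in range(n_child)' loop of A (stops at the first failing child, as Python does)
def childLoopA : Nat → Nat → Int → List Int → List Int → Option (Int × List Int × List Int)
  | _, 0, mt, vals, rem => some (mt, vals, rem)
  | f, k+1, mt, vals, rem =>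
    match sumMetaA f rem with
    | none => none
    | some (ct, cv, rem') => childLoopA f k (mt + ct) (vals ++ [cv]) rem'
  termination_by f k _ _ _ => (f, 1, k)
end

def part_2 (entries : List Int) : Int :=
  match sumMetaA (entries.length + 1) entries with
  | some (_, v, _) => v
  | none => 0

-- ===== PORT B =====
-- needed only for termination of runB (a slice never lengthens a list)
theorem slice_from_len_le (xs : List Int) (a : Int) :
    (PySem.List.slice xs (some a) none).length ≤ xs.length := by
  rw [PySem.List.slice_some_none]; simp

-- Port of B's while-loop.  State: remaining entries and the stack of frames
-- (n_child, pending children, n_meta, completed child values); no fuel is needed,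
-- every iteration strictly decreases 2*rest.length + stack.length.
def runB : List Int → List (Int × Int × Int × List Int) → Option Int
  | rest, (nc, pending, nm, vals) :: tl =>
    if pending = 0 then
      let metaL := PySem.List.slice rest none (some nm)
      let rest' := PySem.List.slice rest (some nm) none
      let value : Int :=
        if nc = 0 then metaL.sum
        else metaL.foldl
          (fun acc m => if 0 < m ∧ m ≤ (vals.length : Int) then acc + PySem.List.pyGetD vals (m - 1) 0 else acc) 0
      match tl with
      | [] => some value
      | (nc2, p2, nm2, vals2) :: tl2 => runB rest' ((nc2, p2, nm2, vals2 ++ [value]) :: tl2)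
    else
      match rest with
      | a :: b :: r => runB r ((a, max a 0, b, []) :: (nc, pending - 1, nm, vals) :: tl)
      | _ => none
  | rest, [] =>
    match rest with
    | a :: b :: r => runB r [(a, max a 0, b, [])]
    | _ => none
  termination_by rest stack => 2 * rest.length + stack.length
  decreasing_by
  · have := slice_from_len_le rest nm; simp; omega
  · simp; omega
  · simp; omega

def part_2_alt (entries : List Int) : Int :=
  match runB entries [] with
  | some v => v
  | none => 0

-- ===== PRECONDITION & SPEC =====
-- Pre_: exactly the inputs on which Python's part_2 returns (elsewhere it raises
-- unpacking a too-short header slice).  Well-formedness of a header-prefixed tree is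
-- inherently recursive, so no non-recursive decidable condition exists; chk checks the
-- SHAPE only (a stack of (pending-children, n_meta) counters; it computes no sums or
-- values), and its fuel 2*length+4 exceeds the possible number of steps (every pushed
-- frame consumed a 2-entry header), so fuel never cuts a well-formed input off.
def chk : Nat → List Int → List (Nat × Int) → Bool
  | 0, _, _ => false
  | _+1, _, [] => true
  | f+1, rest, (0, nm) :: st => chk f (PySem.List.slice rest (some nm) none) st
  | f+1, rest, (k+1, nm) :: st =>
    match rest with
    | a :: b :: r => chk f r ((a.toNat, b) :: (k, nm) :: st)
    | _ => false

def Pre_part_2 (entries : List Int) : Prop :=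
  chk (2 * entries.length + 4) entries [(1, 0)] = true
instance (entries : List Int) : Decidable (Pre_part_2 entries) := by unfold Pre_part_2; infer_instance

def pvWitness_part_2 : List Int := [2, 3, 0, 3, 10, 11, 12, 1, 1, 0, 1, 99, 2, 1, 1, 2]

def Spec_part_2 (entries : List Int) (out : Int) : Prop := out = part_2_alt entries
instance (entries : List Int) (out : Int) : Decidable (Spec_part_2 entries out) := by unfold Spec_part_2; infer_instance

-- ===== CLAIM (what is proved, stated in full; the proofs are below) =====
def Claim_equal_part_2 : Prop := ∀ (entries : List Int), Dom_part_2 entries → Pre_part_2 entries → Spec_part_2 entries (part_2 entries)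

-- ===== LEMMAS AND PROOFS =====

-- usable equation lemmas for runB (its match-splitter equations carry awkward side conditions)
theorem runB_pop (nc nm : Int) (rest vals : List Int) (tl : List (Int × Int × Int × List Int)) :
    runB rest ((nc, 0, nm, vals) :: tl) =
      (let metaL := PySem.List.slice rest none (some nm)
       let rest' := PySem.List.slice rest (some nm) none
       let value : Int :=
         if nc = 0 then metaL.sum
         else metaL.foldl
           (fun acc m => if 0 < m ∧ m ≤ (vals.length : Int) then acc + PySem.List.pyGetD vals (m - 1) 0 else acc) 0
       match tl with
       | [] => some value
       | (nc2, p2, nm2, vals2) :: tl2 => runB rest' ((nc2, p2, nm2, vals2 ++ [value]) :: tl2)) := by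
  match rest with
  | [] => rw [runB] <;> simp
  | [a] => rw [runB] <;> simp
  | a :: b :: r => (rw [runB]; simp)

theorem runB_push (nc pending nm a b : Int) (r vals : List Int) (tl : List (Int × Int × Int × List Int))
    (h : ¬ pending = 0) :
    runB (a :: b :: r) ((nc, pending, nm, vals) :: tl) =
      runB r ((a, max a 0, b, []) :: (nc, pending - 1, nm, vals) :: tl) := by
  rw [runB]; simp [h]

theorem runB_start (a b : Int) (r : List Int) :
    runB (a :: b :: r) [] = runB r [(a, max a 0, b, [])] := by
  conv_lhs => rw [runB]

-- what B's loop does after finishing a node of value v with remainder rem and stack tl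
def popCont (v : Int) (rem : List Int) (tl : List (Int × Int × Int × List Int)) : Option Int :=
  match tl with
  | [] => some v
  | (nc, p, nm, vs) :: tl' => runB rem ((nc, p, nm, vs ++ [v]) :: tl')

theorem sumMetaA_cons (f : Nat) (e : List Int) (x : Int × Int × List Int)
    (h : sumMetaA f e = some x) : ∃ a b r, e = a :: b :: r := by
  match f, e with
  | 0, _ => simp [sumMetaA] at h
  | f+1, [] => simp [sumMetaA] at h
  | f+1, [a] => simp [sumMetaA] at h
  | f+1, a :: b :: r => exact ⟨a, b, r, rfl⟩

-- One node processed by A ⇒ B's machine, from the state just after pushing that node's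
-- fresh frame, reaches exactly the continuation with A's value for the node.
theorem mainNode : ∀ f a b rest mt v rem,
    sumMetaA f (a :: b :: rest) = some (mt, v, rem) →
    ∀ tl, runB rest ((a, max a 0, b, []) :: tl) = popCont v rem tl := by
  intro f
  induction f with
  | zero => intro a b rest mt v rem h; simp [sumMetaA] at h
  | succ f ih =>
    -- inner lemma: the child loop of A matches B's pending countdown
    have cl : ∀ k mt₀ vals₀ rem₀ mt₁ vals₁ rem₁,
        childLoopA f k mt₀ vals₀ rem₀ = some (mt₁, vals₁, rem₁) →
        ∀ nc nm tl, runB rem₀ ((nc, (k : Int), nm, vals₀) :: tl)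
                  = runB rem₁ ((nc, 0, nm, vals₁) :: tl) := by
      intro k
      induction k with
      | zero =>
        intro mt₀ vals₀ rem₀ mt₁ vals₁ rem₁ h nc nm tl
        simp [childLoopA] at h
        obtain ⟨h1, h2, h3⟩ := h
        subst h2; subst h3; rfl
      | succ k ihk =>
        intro mt₀ vals₀ rem₀ mt₁ vals₁ rem₁ h nc nm tl
        rw [childLoopA] at h
        cases hc : sumMetaA f rem₀ with
        | none => rw [hc] at h; simp at h
        | some x =>
          obtain ⟨ct, cv, rem'⟩ := x
          rw [hc] at h; simp at h
          obtain ⟨a', b', r', he⟩ := sumMetaA_cons f rem₀ _ hc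
          subst he
          have hk0 : ¬ ((k + 1 : Nat) : Int) = 0 := by push_cast; omega
          rw [runB_push _ _ _ _ _ _ _ _ hk0]
          have hdec : ((k + 1 : Nat) : Int) - 1 = (k : Int) := by push_cast; ring
          rw [hdec]
          rw [ih a' b' r' ct cv rem' hc]
          unfold popCont
          exact ihk _ _ _ _ _ _ h nc nm tl
    intro a b rest mt v rem h tl
    rw [sumMetaA] at h
    cases hc : childLoopA f a.toNat 0 [] rest with
    | none => rw [hc] at h; simp at h
    | some x =>
      obtain ⟨mt₀, vals, rem₀⟩ := x
      rw [hc] at h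
      simp only [Option.some.injEq, Prod.mk.injEq] at h
      obtain ⟨hmt, hv, hrem⟩ := h
      have hmax : max a 0 = (a.toNat : Int) := by
        rw [Int.toNat_eq_max]
      rw [hmax, cl a.toNat 0 [] rest mt₀ vals rem₀ hc a b tl]
      rw [runB_pop]
      rw [← hv, ← hrem]
      cases tl with
      | nil => rfl
      | cons fr tl' => obtain ⟨nc2, p2, nm2, vals2⟩ := fr; rfl


-- length invariant: a parsed node consumes at least its 2-entry header
theorem sumMetaA_len : ∀ f e mt v rem, sumMetaA f e = some (mt, v, rem) → rem.length + 2 ≤ e.length := by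
  intro f
  induction f with
  | zero => intro e mt v rem h; simp [sumMetaA] at h
  | succ f ih =>
    have cl : ∀ k mt vals r0 mt1 vals1 r1,
        childLoopA f k mt vals r0 = some (mt1, vals1, r1) → r1.length ≤ r0.length := by
      intro k
      induction k with
      | zero =>
        intro mt vals r0 mt1 vals1 r1 h
        simp [childLoopA] at h
        obtain ⟨-, -, h3⟩ := h
        exact h3 ▸ Nat.le_refl _
      | succ k ihk =>
        intro mt vals r0 mt1 vals1 r1 h
        rw [childLoopA] at h
        cases hs : sumMetaA f r0 with
        | none => rw [hs] at h; simp at h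
        | some x =>
          obtain ⟨ct, cv, rem'⟩ := x
          rw [hs] at h; simp at h
          have h1 := ihk _ _ _ _ _ _ h
          have h2 := ih _ _ _ _ hs
          omega
    intro e mt v rem h
    match e with
    | [] => simp [sumMetaA] at h
    | [a] => simp [sumMetaA] at h
    | a :: b :: rest =>
      rw [sumMetaA] at h
      cases hc : childLoopA f a.toNat 0 [] rest with
      | none => rw [hc] at h; simp at h
      | some x =>
        obtain ⟨mt0, vals, rem0⟩ := x
        rw [hc] at h
        simp only [Option.some.injEq, Prod.mk.injEq] at h
        obtain ⟨_, _, hrem⟩ := h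
        have h1 := cl _ _ _ _ _ _ _ hc
        have h2 := slice_from_len_le rem0 b
        rw [hrem] at h2
        simp only [List.length_cons]
        omega

-- any fuel at least e.length yields the same (successful) result
theorem suffA : ∀ f e x, sumMetaA f e = some x → ∀ g, e.length ≤ g → sumMetaA g e = some x := by
  intro f
  induction f with
  | zero => intro e x h; simp [sumMetaA] at h
  | succ f ih =>
    have clsuff : ∀ k mt vals r0 x, childLoopA f k mt vals r0 = some x →
        ∀ g, r0.length + 1 ≤ g → childLoopA g k mt vals r0 = some x := by
      intro k
      induction k with
      | zero => intro mt vals r0 x h g hg; simpa [childLoopA] using h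
      | succ k ihk =>
        intro mt vals r0 x h g hg
        rw [childLoopA] at h
        cases hs : sumMetaA f r0 with
        | none => rw [hs] at h; simp at h
        | some y =>
          obtain ⟨ct, cv, rem'⟩ := y
          rw [hs] at h; simp at h
          rw [childLoopA]
          rw [ih _ _ hs g (by omega)]
          have hlen := sumMetaA_len f r0 ct cv rem' hs
          exact ihk _ _ _ _ h g (by omega)
    intro e x h g hg
    match e with
    | [] => simp [sumMetaA] at h
    | [a] => simp [sumMetaA] at h
    | a :: b :: rest =>
      rw [sumMetaA] at h
      cases hc : childLoopA f a.toNat 0 [] rest with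
      | none => rw [hc] at h; simp at h
      | some y =>
        obtain ⟨mt0, vals, rem0⟩ := y
        rw [hc] at h
        simp only [List.length_cons] at hg
        obtain ⟨g', rfl⟩ : ∃ g', g = g' + 1 := ⟨g - 1, by omega⟩
        rw [sumMetaA]
        rw [clsuff _ _ _ _ _ hc g' (by omega)]
        exact h

-- the child-loop lifted to any sufficient fuel (used to combine partial parses)
theorem suffC : ∀ f k mt vals r0 x, childLoopA f k mt vals r0 = some x →
    ∀ g, r0.length + 1 ≤ g → childLoopA g k mt vals r0 = some x := by
  intro f k
  induction k with
  | zero => intro mt vals r0 x h g hg; simpa [childLoopA] using h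
  | succ k ihk =>
    intro mt vals r0 x h g hg
    rw [childLoopA] at h
    cases hs : sumMetaA f r0 with
    | none => rw [hs] at h; simp at h
    | some y =>
      obtain ⟨ct, cv, rem'⟩ := y
      rw [hs] at h; simp at h
      rw [childLoopA, suffA _ _ _ hs g (by omega)]
      have hlen := sumMetaA_len f r0 ct cv rem' hs
      exact ihk _ _ _ _ h g (by omega)

-- the child-loop accumulators are a running sum / running append
theorem shiftC : ∀ k f mt vals r, childLoopA f k mt vals r =
    (childLoopA f k 0 [] r).map (fun x => (mt + x.1, vals ++ x.2.1, x.2.2)) := by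
  intro k
  induction k with
  | zero => intro f mt vals r; simp [childLoopA]
  | succ k ihk =>
    intro f mt vals r
    rw [childLoopA]
    conv_rhs => rw [childLoopA]
    cases hs : sumMetaA f r with
    | none => simp
    | some y =>
      obtain ⟨ct, cv, rem'⟩ := y
      simp only
      rw [ihk f (mt + ct) (vals ++ [cv]) rem', ihk f (0 + ct) ([] ++ [cv]) rem']
      cases childLoopA f k 0 [] rem' with
      | none => simp
      | some z => simp [add_assoc, List.append_assoc]

-- length invariant for the whole child loop
theorem lenC : ∀ f k mt vals r0 mt1 vals1 r1,
    childLoopA f k mt vals r0 = some (mt1, vals1, r1) → r1.length ≤ r0.length := by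
  intro f k
  induction k with
  | zero =>
    intro mt vals r0 mt1 vals1 r1 h
    simp [childLoopA] at h
    obtain ⟨-, -, h3⟩ := h
    exact h3 ▸ Nat.le_refl _
  | succ k ihk =>
    intro mt vals r0 mt1 vals1 r1 h
    rw [childLoopA] at h
    cases hs : sumMetaA f r0 with
    | none => rw [hs] at h; simp at h
    | some x =>
      obtain ⟨ct, cv, rem'⟩ := x
      rw [hs] at h; simp at h
      have h1 := ihk _ _ _ _ _ _ h
      have h2 := sumMetaA_len f r0 ct cv rem' hs
      omega

-- what a true run of chk guarantees: each open frame's remaining children really parse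
def GoodS : List Int → List (Nat × Int) → Prop
  | _, [] => True
  | rest, (k, nm) :: st =>
    ∃ f mt vals rem, childLoopA f k 0 [] rest = some (mt, vals, rem) ∧
      GoodS (PySem.List.slice rem (some nm) none) st

theorem chkSound : ∀ F rest stack, chk F rest stack = true → GoodS rest stack := by
  intro F
  induction F with
  | zero => intro rest stack h; simp [chk] at h
  | succ F ih =>
    intro rest stack h
    match stack with
    | [] => trivial
    | (0, nm) :: st =>
      rw [chk] at h
      exact ⟨0, 0, [], rest, by simp [childLoopA], ih _ _ h⟩
    | (k+1, nm) :: st =>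
      match rest with
      | [] => simp [chk] at h
      | [a] => simp [chk] at h
      | a :: b :: r =>
        rw [chk] at h
        obtain ⟨f1, mt1, vals1, rem1, h1, ⟨f2, mt2, vals2, rem2, h2, hg2⟩⟩ := ih _ _ h
        have l1 : rem1.length ≤ r.length := lenC f1 a.toNat 0 [] r _ _ _ h1
        have l2 := slice_from_len_le rem1 b
        obtain ⟨ct, cv, hs1⟩ : ∃ ct cv,
            sumMetaA (f1 + 1) (a :: b :: r) = some (ct, cv, PySem.List.slice rem1 (some b) none) := by
          rw [sumMetaA, h1]; exact ⟨_, _, rfl⟩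
        have hs1' := suffA _ _ _ hs1 (r.length + 2) (by simp)
        have h2' := suffC _ _ _ _ _ _ h2 (r.length + 2) (by omega)
        refine ⟨r.length + 2, 0 + ct + mt2, [] ++ [cv] ++ vals2, rem2, ?_, hg2⟩
        calc childLoopA (r.length + 2) (k + 1) 0 [] (a :: b :: r)
            = childLoopA (r.length + 2) k (0 + ct) ([] ++ [cv])
                (PySem.List.slice rem1 (some b) none) := by rw [childLoopA, hs1']
          _ = some (0 + ct + mt2, [] ++ [cv] ++ vals2, rem2) := by rw [shiftC, h2']; rfl

-- ===== VERDICT (by name: the statement is the Claim_ definition above) =====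
theorem part_2_spec : Claim_equal_part_2 := by
  intro entries _hdom hpre
  unfold Spec_part_2
  unfold Pre_part_2 at hpre
  obtain ⟨f, mt, vals, rem0, h1, -⟩ := chkSound _ _ _ hpre
  rw [show (1 : Nat) = 0 + 1 from rfl, childLoopA] at h1
  cases hs : sumMetaA f entries with
  | none => rw [hs] at h1; simp at h1
  | some x =>
    obtain ⟨ct, cv, rem'⟩ := x
    have hs2 := suffA _ _ _ hs (entries.length + 1) (by omega)
    obtain ⟨a, b, r, he⟩ := sumMetaA_cons _ _ _ hs2
    subst he
    unfold part_2 part_2_alt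
    rw [hs2, runB_start]
    rw [mainNode _ a b r ct cv rem' hs2 []]
    rfl
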